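-- pv_equiv track=rewrite | github.com/DanhNguyennene/HaLong_embedding_finetune | train_ddp.py | generate_neighbor_samples
-- ===== SOURCE A (Python) =====
-- def generate_neighbor_samples(q, pos_c, all_contexts, num_negatives):
--     samples = [(q, pos_c, 1)]  # Positive sample
--
--     pos_index = all_contexts.index(pos_c)
--     added_negatives = 0
--
--     left_offset = right_offset = 1
--
--     while added_negatives < num_negatives:
--         # Try left side
--         if pos_index - left_offset >= 0 and added_negatives < num_negatives:
--             samples.append((q, all_contexts[pos_index - left_offset], 0))
--             added_negatives += 1
--             left_offset += 1
--
--         # Try right side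
--         if pos_index + right_offset < len(all_contexts) and added_negatives < num_negatives:
--             samples.append((q, all_contexts[pos_index + right_offset], 0))
--             added_negatives += 1
--             right_offset += 1
--
--         # Prevent infinite loop
--         if left_offset + right_offset > len(all_contexts):
--             break
--
--     return samples
-- ===== SOURCE B (Python) =====
-- def generate_neighbor_samples(q, pos_c, all_contexts, num_negatives):
--     pos_index = all_contexts.index(pos_c)
--     other = [i for i in range(len(all_contexts)) if i != pos_index]
--     order = sorted(other, key=lambda i: (abs(i - pos_index), i > pos_index))
--     chosen = order[:max(0, num_negatives)]
--     return [(q, pos_c, 1)] + [(q, all_contexts[i], 0) for i in chosen]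
-- ===== Notes on version B (the rewrite author's own statement) =====
-- stated objective: idiomatic
-- what changed: B replaces A's stateful outward two-offset while loop (left/right offsets, added counter, break guard) by sorting all other indices once on the key 2*|i-pos|+(i>pos) and slicing the first max(0, num_negatives) of them.
-- outside the precondition, e.g. on generate_neighbor_samples('q', 'x', ['a', 'b'], 2): A raises ValueError, B raises ValueError
import Mathlib
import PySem

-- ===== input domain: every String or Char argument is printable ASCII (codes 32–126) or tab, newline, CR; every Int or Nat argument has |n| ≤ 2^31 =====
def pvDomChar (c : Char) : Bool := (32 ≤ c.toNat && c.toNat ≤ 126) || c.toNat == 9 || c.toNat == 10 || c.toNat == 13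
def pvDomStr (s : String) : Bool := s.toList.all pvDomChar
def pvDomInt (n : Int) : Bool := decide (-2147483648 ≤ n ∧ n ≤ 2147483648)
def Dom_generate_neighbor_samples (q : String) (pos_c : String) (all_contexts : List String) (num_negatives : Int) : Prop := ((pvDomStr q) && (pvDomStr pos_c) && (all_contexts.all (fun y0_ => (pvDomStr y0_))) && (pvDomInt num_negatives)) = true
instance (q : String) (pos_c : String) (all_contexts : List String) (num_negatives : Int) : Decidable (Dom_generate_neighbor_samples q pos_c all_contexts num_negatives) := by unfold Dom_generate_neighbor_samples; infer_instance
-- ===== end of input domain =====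

-- B replaces A's outward two-offset while loop by sorting the other indices on the
-- key 2*|i-pos| + (i>pos) and slicing the first max(0, num_negatives) (objective: idiomatic).

-- ===== PORT A =====
-- A's while loop as a fuel recursion (the fuel only makes the same computation total;
-- the loop adds at least one negative per non-breaking iteration, so num.toNat + 1 iterations
-- always suffice).  State is (added_negatives, left_offset, right_offset, samples); the two
-- independent `if`s of the loop body are written as nested branches in the same order.
def gnsLoopA (q : String) (ctxs : List String) (num : Int) (p : Nat) :
    Nat → Int → Int → Int → List (String × String × Int) → List (String × String × Int)
  | 0, _, _, _, samples => samples
  | fuel+1, added, l, r, samples =>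
    if added < num then
      if 0 ≤ (p : Int) - l ∧ added < num then
        -- left side taken
        if (p : Int) + r < ctxs.length ∧ added + 1 < num then
          if (l + 1) + (r + 1) > (ctxs.length : Int) then
            samples ++ [(q, PySem.List.pyGetD ctxs ((p : Int) - l) "", (0 : Int))]
              ++ [(q, PySem.List.pyGetD ctxs ((p : Int) + r) "", (0 : Int))]
          else gnsLoopA q ctxs num p fuel (added + 2) (l + 1) (r + 1)
            (samples ++ [(q, PySem.List.pyGetD ctxs ((p : Int) - l) "", (0 : Int))]
              ++ [(q, PySem.List.pyGetD ctxs ((p : Int) + r) "", (0 : Int))])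
        else
          if (l + 1) + r > (ctxs.length : Int) then
            samples ++ [(q, PySem.List.pyGetD ctxs ((p : Int) - l) "", (0 : Int))]
          else gnsLoopA q ctxs num p fuel (added + 1) (l + 1) r
            (samples ++ [(q, PySem.List.pyGetD ctxs ((p : Int) - l) "", (0 : Int))])
      else
        if (p : Int) + r < ctxs.length ∧ added < num then
          if l + (r + 1) > (ctxs.length : Int) then
            samples ++ [(q, PySem.List.pyGetD ctxs ((p : Int) + r) "", (0 : Int))]
          else gnsLoopA q ctxs num p fuel (added + 1) l (r + 1)
            (samples ++ [(q, PySem.List.pyGetD ctxs ((p : Int) + r) "", (0 : Int))])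
        else
          if l + r > (ctxs.length : Int) then samples
          else gnsLoopA q ctxs num p fuel added l r samples
    else samples

def generate_neighbor_samples (q : String) (pos_c : String) (all_contexts : List String) (num_negatives : Int) : List (String × String × Int) :=
  match PySem.List.index? all_contexts pos_c with
  | none => []   -- all_contexts.index(pos_c) raises ValueError: excluded by Pre_
  | some pos_index =>
      gnsLoopA q all_contexts num_negatives pos_index (num_negatives.toNat + 1) 0 1 1 [(q, pos_c, 1)]

-- ===== PORT B =====
-- key 2*abs(i - pos_index) + (i > pos_index)  (bool counts as 0/1 in Python arithmetic)
def gnsKey (p : Nat) (i : Nat) : Nat :=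
  2 * ((i : Int) - (p : Int)).natAbs + (if p < i then 1 else 0)

def generate_neighbor_samples_alt (q : String) (pos_c : String) (all_contexts : List String) (num_negatives : Int) : List (String × String × Int) :=
  match PySem.List.index? all_contexts pos_c with
  | none => []   -- .index raises ValueError: excluded by Pre_
  | some pos_index =>
      let other := (List.range all_contexts.length).filter (fun i => decide (i ≠ pos_index))
      let order := PySem.List.sorted other (gnsKey pos_index) false
      let chosen := order.take (max 0 num_negatives).toNat
      (q, pos_c, 1) :: chosen.map (fun i => (q, all_contexts.getD i "", (0 : Int)))
      -- i comes from range(len(all_contexts)), so all_contexts[i] is the plain in-range access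

-- ===== PRECONDITION & SPEC =====
-- Pre_ excludes exactly the inputs where all_contexts.index(pos_c) raises ValueError in both programs.
def Pre_generate_neighbor_samples (q : String) (pos_c : String) (all_contexts : List String) (num_negatives : Int) : Prop :=
  pos_c ∈ all_contexts
instance (q : String) (pos_c : String) (all_contexts : List String) (num_negatives : Int) : Decidable (Pre_generate_neighbor_samples q pos_c all_contexts num_negatives) := by unfold Pre_generate_neighbor_samples; infer_instance

def pvWitness_generate_neighbor_samples : String × String × List String × Int := ("q", "b", ["a", "b", "c", "d"], 2)

def Spec_generate_neighbor_samples (q : String) (pos_c : String) (all_contexts : List String) (num_negatives : Int) (out : List (String × String × Int)) : Prop := out = generate_neighbor_samples_alt q pos_c all_contexts num_negatives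
instance (q : String) (pos_c : String) (all_contexts : List String) (num_negatives : Int) (out : List (String × String × Int)) : Decidable (Spec_generate_neighbor_samples q pos_c all_contexts num_negatives out) := by unfold Spec_generate_neighbor_samples; infer_instance

-- ===== CLAIM (what is proved, stated in full; the proofs are below) =====
def Claim_equal_generate_neighbor_samples : Prop := ∀ (q : String) (pos_c : String) (all_contexts : List String) (num_negatives : Int), Dom_generate_neighbor_samples q pos_c all_contexts num_negatives → Pre_generate_neighbor_samples q pos_c all_contexts num_negatives → Spec_generate_neighbor_samples q pos_c all_contexts num_negatives (generate_neighbor_samples q pos_c all_contexts num_negatives)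

-- ===== LEMMAS AND PROOFS =====

-- [p - d, p - d - 1, …, 0]: the untried left-side indices at left_offset d
def leftIdx (p d : Nat) : List Nat := (List.range (p + 1 - d)).reverse
-- [p + d, …, n - 1]: the untried right-side indices at right_offset d
def rightIdx (p n d : Nat) : List Nat := List.range' (p + d) (n - (p + d))

-- alternate one from each list (left first), then the tail of the longer one
def gnsMerge : List Nat → List Nat → List Nat
  | [], ys => ys
  | x :: xs, [] => x :: xs
  | x :: xs, y :: ys => x :: y :: gnsMerge xs ys

theorem gnsMerge_nil_right : ∀ (xs : List Nat), gnsMerge xs [] = xs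
  | [] => rfl
  | _ :: _ => rfl

theorem gnsMerge_cons_cons (x y : Nat) (xs ys : List Nat) :
    gnsMerge (x :: xs) (y :: ys) = x :: y :: gnsMerge xs ys := rfl

theorem leftIdx_cons (p d : Nat) (h : d ≤ p) : leftIdx p d = (p - d) :: leftIdx p (d + 1) := by
  unfold leftIdx
  have h1 : p + 1 - d = (p - d) + 1 := by omega
  have h2 : p + 1 - (d + 1) = p - d := by omega
  rw [h1, h2, List.range_succ, List.reverse_append]
  simp

theorem leftIdx_nil (p d : Nat) (h : p < d) : leftIdx p d = [] := by
  unfold leftIdx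
  have : p + 1 - d = 0 := by omega
  simp [this]

theorem rightIdx_cons (p n d : Nat) (h : p + d < n) : rightIdx p n d = (p + d) :: rightIdx p n (d + 1) := by
  unfold rightIdx
  have h1 : n - (p + d) = (n - (p + (d + 1))) + 1 := by omega
  rw [h1, List.range'_succ]
  congr 1

theorem rightIdx_nil (p n d : Nat) (h : n ≤ p + d) : rightIdx p n d = [] := by
  unfold rightIdx
  have : n - (p + d) = 0 := by omega
  simp [this]

theorem mem_leftIdx {p d x : Nat} (h : x ∈ leftIdx p d) : x + d ≤ p := by
  unfold leftIdx at h
  simp [List.mem_range] at h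
  omega

theorem mem_rightIdx {p n d x : Nat} (h : x ∈ rightIdx p n d) : p + d ≤ x ∧ x < n := by
  unfold rightIdx at h
  simp [List.mem_range'] at h
  omega

theorem mem_gnsMerge {x : Nat} : ∀ {xs ys : List Nat}, x ∈ gnsMerge xs ys → x ∈ xs ∨ x ∈ ys
  | [], ys, h => Or.inr h
  | _ :: _, [], h => Or.inl h
  | a :: xs, b :: ys, h => by
      simp only [gnsMerge, List.mem_cons] at h ⊢
      rcases h with h | h | h
      · exact Or.inl (Or.inl h)
      · exact Or.inr (Or.inl h)
      · rcases mem_gnsMerge h with h' | h'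
        · exact Or.inl (Or.inr h')
        · exact Or.inr (Or.inr h')

theorem gnsMerge_perm : ∀ (xs ys : List Nat), (gnsMerge xs ys).Perm (xs ++ ys)
  | [], ys => by simp [gnsMerge]
  | x :: xs, [] => by simp [gnsMerge]
  | x :: xs, y :: ys => by
      have ih := gnsMerge_perm xs ys
      exact (((ih.cons y).cons x).trans ((List.perm_middle.symm.cons x)))

theorem gnsMerge_head (x : Nat) (xs ys : List Nat) : ∃ t, gnsMerge (x :: xs) ys = x :: t := by
  cases ys with
  | nil => exact ⟨xs, rfl⟩
  | cons y ys => exact ⟨_, rfl⟩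

theorem gnsLoopA_stop (q : String) (ctxs : List String) (num : Int) (p : Nat) :
    ∀ (fuel : Nat) (a l r : Int) (s : List (String × String × Int)), ¬ (a < num) →
      gnsLoopA q ctxs num p fuel a l r s = s := by
  intro fuel a l r s h
  cases fuel with
  | zero => rfl
  | succ fuel => simp [gnsLoopA, h]

-- the main A-side loop characterisation
theorem gnsLoopA_spec (q : String) (ctxs : List String) (num : Int) (p : Nat) :
    ∀ (fuel : Nat) (a l r : Int) (acc : List (String × String × Int)),
      1 ≤ l → 1 ≤ r → l ≤ (p : Int) + 1 → r ≤ (ctxs.length : Int) - p →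
      (l = r ∨ (l = (p : Int) + 1 ∧ l ≤ r) ∨ (r = (ctxs.length : Int) - p ∧ r ≤ l)) →
      (num - a).toNat < fuel →
      gnsLoopA q ctxs num p fuel a l r acc =
        acc ++ (((gnsMerge (leftIdx p l.toNat) (rightIdx p ctxs.length r.toNat)).take
                  (num - a).toNat).map (fun i => (q, ctxs.getD i "", (0 : Int)))) := by
  intro fuel
  induction fuel with
  | zero =>
    intro a l r acc _ _ _ _ _ hfuel
    omega
  | succ fuel ih =>
    intro a l r acc h1l h1r hlp hrn hdisj hfuel
    simp only [gnsLoopA]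
    split_ifs with ha hL hR hb1 hb2 hR' hb3 hb4
    · -- both sides emit, then the loop breaks: everything is exhausted
      have hlr : l = r := by rcases hdisj with h | h | h <;> omega
      have hcL : (p : Int) - l = ((p - l.toNat : Nat) : Int) := by omega
      have hcR : (p : Int) + r = ((p + r.toNat : Nat) : Int) := by omega
      rw [hcL, hcR, PySem.List.pyGetD_natCast, PySem.List.pyGetD_natCast,
        leftIdx_cons p l.toNat (by omega), rightIdx_cons p ctxs.length r.toNat (by omega),
        leftIdx_nil p (l.toNat + 1) (by omega), rightIdx_nil p ctxs.length (r.toNat + 1) (by omega)]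
      obtain ⟨m, hm⟩ : ∃ m, (num - a).toNat = m + 2 := ⟨(num - a).toNat - 2, by omega⟩
      rw [hm]
      show _ = acc ++ (List.take (m + 2) [p - l.toNat, p + r.toNat]).map _
      simp [List.take_succ_cons]
    · -- both sides emit, loop continues
      have hlr : l = r := by rcases hdisj with h | h | h <;> omega
      have hcL : (p : Int) - l = ((p - l.toNat : Nat) : Int) := by omega
      have hcR : (p : Int) + r = ((p + r.toNat : Nat) : Int) := by omega
      rw [hcL, hcR, PySem.List.pyGetD_natCast, PySem.List.pyGetD_natCast,
        ih (a + 2) (l + 1) (r + 1) _ (by omega) (by omega) (by omega) (by omega)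
          (by left; omega) (by omega),
        show (l + 1).toNat = l.toNat + 1 by omega, show (r + 1).toNat = r.toNat + 1 by omega,
        leftIdx_cons p l.toNat (by omega), rightIdx_cons p ctxs.length r.toNat (by omega)]
      obtain ⟨m, hm⟩ : ∃ m, (num - a).toNat = m + 2 := ⟨(num - a).toNat - 2, by omega⟩
      rw [hm, show (num - (a + 2)).toNat = m by omega]
      simp [gnsMerge_cons_cons, List.take_succ_cons]
    · -- left emits, then the loop breaks
      have hcL : (p : Int) - l = ((p - l.toNat : Nat) : Int) := by omega
      rw [hcL, PySem.List.pyGetD_natCast, leftIdx_cons p l.toNat (by omega)]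
      by_cases ha2 : a + 1 < num
      · -- right side is dead and the break proves the left is exhausted too
        have hrd : ctxs.length ≤ p + r.toNat := by omega
        have : r = (ctxs.length : Int) - p := by omega
        have hld : p < l.toNat + 1 := by omega
        rw [leftIdx_nil p (l.toNat + 1) hld, rightIdx_nil p ctxs.length r.toNat hrd]
        obtain ⟨m, hm⟩ : ∃ m, (num - a).toNat = m + 1 := ⟨(num - a).toNat - 1, by omega⟩
        rw [hm]
        show _ = acc ++ (List.take (m + 1) (gnsMerge [p - l.toNat] [])).map _
        simp [gnsMerge, List.take_succ_cons]
      · -- quota reached after the left emission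
        have hm : (num - a).toNat = 1 := by omega
        obtain ⟨t, ht⟩ := gnsMerge_head (p - l.toNat) (leftIdx p (l.toNat + 1)) (rightIdx p ctxs.length r.toNat)
        rw [ht, hm]
        simp [List.take_succ_cons]
    · -- left emits, loop continues
      have hcL : (p : Int) - l = ((p - l.toNat : Nat) : Int) := by omega
      rw [hcL, PySem.List.pyGetD_natCast, leftIdx_cons p l.toNat (by omega)]
      by_cases ha2 : a + 1 < num
      · -- right side is dead (r = n - p); keep harvesting the left
        have hrd : ctxs.length ≤ p + r.toNat := by omega
        have hrr : r = (ctxs.length : Int) - p := by omega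
        have hrl : r ≤ l := by rcases hdisj with h | h | h <;> omega
        rw [ih (a + 1) (l + 1) r _ (by omega) (by omega) (by omega) (by omega)
            (by right; right; omega) (by omega),
          show (l + 1).toNat = l.toNat + 1 by omega,
          rightIdx_nil p ctxs.length r.toNat hrd, gnsMerge_nil_right, gnsMerge_nil_right]
        obtain ⟨m, hm⟩ : ∃ m, (num - a).toNat = m + 1 := ⟨(num - a).toNat - 1, by omega⟩
        rw [hm, show (num - (a + 1)).toNat = m by omega]
        simp [List.take_succ_cons]
      · -- quota reached after the left emission; actual loop exit happens next iteration
        rw [gnsLoopA_stop q ctxs num p fuel (a + 1) (l + 1) r _ (by omega)]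
        have hm : (num - a).toNat = 1 := by omega
        obtain ⟨t, ht⟩ := gnsMerge_head (p - l.toNat) (leftIdx p (l.toNat + 1)) (rightIdx p ctxs.length r.toNat)
        rw [ht, hm]
        simp [List.take_succ_cons]
    · -- left dead, right emits, then the loop breaks: right now exhausted too
      have hld : p < l.toNat := by omega
      have hcR : (p : Int) + r = ((p + r.toNat : Nat) : Int) := by omega
      rw [hcR, PySem.List.pyGetD_natCast, leftIdx_nil p l.toNat hld,
        rightIdx_cons p ctxs.length r.toNat (by omega),
        rightIdx_nil p ctxs.length (r.toNat + 1) (by omega)]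
      obtain ⟨m, hm⟩ : ∃ m, (num - a).toNat = m + 1 := ⟨(num - a).toNat - 1, by omega⟩
      rw [hm]
      show _ = acc ++ (List.take (m + 1) (gnsMerge [] [p + r.toNat])).map _
      simp [gnsMerge, List.take_succ_cons]
    · -- left dead, right emits, loop continues
      have hld : p < l.toNat := by omega
      have hlp1 : l = (p : Int) + 1 := by omega
      have hlr : l ≤ r := by rcases hdisj with h | h | h <;> omega
      have hcR : (p : Int) + r = ((p + r.toNat : Nat) : Int) := by omega
      rw [hcR, PySem.List.pyGetD_natCast,
        ih (a + 1) l (r + 1) _ (by omega) (by omega) (by omega) (by omega)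
          (by right; left; omega) (by omega),
        show (r + 1).toNat = r.toNat + 1 by omega,
        leftIdx_nil p l.toNat hld, rightIdx_cons p ctxs.length r.toNat (by omega)]
      obtain ⟨m, hm⟩ : ∃ m, (num - a).toNat = m + 1 := ⟨(num - a).toNat - 1, by omega⟩
      rw [hm, show (num - (a + 1)).toNat = m by omega]
      show _ = acc ++ (List.take (m + 1) (gnsMerge [] _)).map _
      simp [gnsMerge, List.take_succ_cons]
    · -- neither side available: the break always fires here
      rw [leftIdx_nil p l.toNat (by omega), rightIdx_nil p ctxs.length r.toNat (by omega)]
      simp [gnsMerge]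
    · -- unreachable: both sides dead forces the break condition
      exfalso
      omega
    · -- quota already reached: while condition false
      have h0 : (num - a).toNat = 0 := by omega
      simp [h0]

theorem gnsKey_left {p x : Nat} (h : x ≤ p) : gnsKey p x = 2 * (p - x) := by
  unfold gnsKey
  rw [if_neg (by omega)]
  have : ((x : Int) - (p : Int)).natAbs = p - x := by omega
  omega

theorem gnsKey_right {p x : Nat} (h : p < x) : gnsKey p x = 2 * (x - p) + 1 := by
  unfold gnsKey
  rw [if_pos h]
  have : ((x : Int) - (p : Int)).natAbs = x - p := by omega
  omega

-- every untried index at offset d has key ≥ 2*d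
theorem gnsKey_lb {p n d y : Nat} (hd : 1 ≤ d)
    (hy : y ∈ gnsMerge (leftIdx p d) (rightIdx p n d)) :
    2 * d ≤ gnsKey p y := by
  rcases mem_gnsMerge hy with h | h
  · have := mem_leftIdx h
    rw [gnsKey_left (by omega)]
    omega
  · have := mem_rightIdx h
    rw [gnsKey_right (by omega)]
    omega

theorem pairwise_merge (p n : Nat) :
    ∀ (f d : Nat), 1 ≤ d → p + 1 ≤ d + f → n ≤ p + d + f →
      (gnsMerge (leftIdx p d) (rightIdx p n d)).Pairwise
        (fun a b => gnsKey p a < gnsKey p b) := by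
  intro f
  induction f with
  | zero =>
    intro d h1 h2 h3
    rw [leftIdx_nil p d (by omega), rightIdx_nil p n d (by omega)]
    exact List.Pairwise.nil
  | succ f ih =>
    intro d h1 h2 h3
    by_cases hl : d ≤ p
    · by_cases hr : p + d < n
      · -- both sides still available
        rw [leftIdx_cons p d hl, rightIdx_cons p n d hr]
        have e : gnsMerge ((p - d) :: leftIdx p (d + 1)) ((p + d) :: rightIdx p n (d + 1)) =
            (p - d) :: (p + d) :: gnsMerge (leftIdx p (d + 1)) (rightIdx p n (d + 1)) := rfl
        rw [e]
        refine List.pairwise_cons.mpr ⟨?_, List.pairwise_cons.mpr ⟨?_, ih (d + 1) (by omega) (by omega) (by omega)⟩⟩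
        · intro y hy
          rcases List.mem_cons.mp hy with rfl | hy
          · rw [gnsKey_left (by omega), gnsKey_right (by omega)]; omega
          · have := gnsKey_lb (by omega) hy
            rw [gnsKey_left (by omega)]; omega
        · intro y hy
          have := gnsKey_lb (by omega) hy
          rw [gnsKey_right (by omega)]; omega
      · -- only the left side remains
        have e : gnsMerge (leftIdx p d) (rightIdx p n d) =
            (p - d) :: gnsMerge (leftIdx p (d + 1)) (rightIdx p n (d + 1)) := by
          rw [rightIdx_nil p n d (by omega), rightIdx_nil p n (d + 1) (by omega),
            leftIdx_cons p d hl, gnsMerge_nil_right, gnsMerge_nil_right]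
        rw [e]
        refine List.pairwise_cons.mpr ⟨?_, ih (d + 1) (by omega) (by omega) (by omega)⟩
        intro y hy
        have := gnsKey_lb (by omega) hy
        rw [gnsKey_left (by omega)]; omega
    · by_cases hr : p + d < n
      · -- only the right side remains
        have e : gnsMerge (leftIdx p d) (rightIdx p n d) =
            (p + d) :: gnsMerge (leftIdx p (d + 1)) (rightIdx p n (d + 1)) := by
          rw [leftIdx_nil p d (by omega), leftIdx_nil p (d + 1) (by omega),
            rightIdx_cons p n d hr]
          rfl
        rw [e]
        refine List.pairwise_cons.mpr ⟨?_, ih (d + 1) (by omega) (by omega) (by omega)⟩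
        intro y hy
        have := gnsKey_lb (by omega) hy
        rw [gnsKey_right (by omega)]; omega
      · rw [leftIdx_nil p d (by omega), rightIdx_nil p n d (by omega)]
        exact List.Pairwise.nil

theorem filter_range_eq (n p : Nat) (hp : p < n) :
    (List.range n).filter (fun i => decide (i ≠ p)) = List.range p ++ rightIdx p n 1 := by
  have h1 : List.range n = List.range p ++ p :: List.range' (p + 1) (n - (p + 1)) := by
    rw [List.range_eq_range', List.range_eq_range',
      show List.range' 0 n = List.range' 0 (p + (n - p)) by congr 1; omega,
      ← List.range'_append]
    simp only [Nat.zero_add]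
    congr 1
    rw [show n - p = (n - (p + 1)) + 1 by omega, List.range'_succ]
    simp
  rw [h1, List.filter_append]
  congr 1
  · rw [List.filter_eq_self]
    intro a ha
    simp only [decide_eq_true_eq]
    have := List.mem_range.mp ha
    omega
  · rw [List.filter_cons_of_neg (by simp)]
    rw [List.filter_eq_self.mpr]
    · rfl
    · intro a ha
      simp only [decide_eq_true_eq]
      have := List.mem_range'.mp ha
      omega

-- B-side: the sorted call names exactly the merged neighbour order
theorem sorted_eq_merge (n p : Nat) (hp : p < n) :
    PySem.List.sorted ((List.range n).filter (fun i => decide (i ≠ p))) (gnsKey p) false =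
      gnsMerge (leftIdx p 1) (rightIdx p n 1) := by
  apply PySem.List.sorted_eq_of_perm_of_pairwise_lt
  · refine ((gnsMerge_perm _ _).trans ?_)
    rw [filter_range_eq n p hp]
    refine List.Perm.append ?_ (List.Perm.refl _)
    rw [show leftIdx p 1 = (List.range p).reverse by unfold leftIdx; congr 1]
    exact List.reverse_perm _
  · exact pairwise_merge p n (p + n) 1 (by omega) (by omega) (by omega)

-- ===== VERDICT (by name: the statement is the Claim_ definition above) =====
theorem generate_neighbor_samples_spec : Claim_equal_generate_neighbor_samples := by
  intro q pos_c ctxs num _ hpre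
  unfold Spec_generate_neighbor_samples generate_neighbor_samples generate_neighbor_samples_alt
  cases h : PySem.List.index? ctxs pos_c with
  | none => exact absurd hpre (List.idxOf?_eq_none_iff.mp h)
  | some p =>
    obtain ⟨hpl, -, -⟩ := PySem.List.getElem_of_index?_eq_some h
    dsimp only
    rw [gnsLoopA_spec q ctxs num p (num.toNat + 1) 0 1 1 _ (by omega) (by omega)
        (by omega) (by omega) (Or.inl rfl) (by omega)]
    rw [sorted_eq_merge ctxs.length p hpl]
    have e1 : (max 0 num).toNat = (num - 0).toNat := by omega
    have e2 : (1 : Int).toNat = 1 := rfl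
    simp [e1, e2]
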